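-- pv_equiv track=rewrite | github.com/williamhl10/keyring | ring_verification.py | InverseSwap
-- ===== SOURCE A (Python) =====
-- def InverseSwap(AES_key, HMAC_key):
-- 	#function to move back to PRF and GEN sets from AES and HMAC sets
-- 	#AES_key and HMAC_key are objects from KeyGen
--
-- 	PRF_set = []
-- 	GEN_set = []
--
-- 	for i in range(0 , len(AES_key)):
--
-- 		#unpacking AES key
-- 		if AES_key[i][0] % 2 == 1:
--
-- 			PRF_set.append(AES_key[i])
--
-- 		else:
--
-- 			GEN_set.append(AES_key[i])
--
-- 		#unpacking HMAC key
-- 		if HMAC_key[i][0] % 2 == 1: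
--
-- 			PRF_set.append(HMAC_key[i])
--
-- 		else:
--
-- 			GEN_set.append(HMAC_key[i])
--
-- 		#sort to get order back
--
-- 		PRF_set.sort(key=lambda ind: ind[0])
-- 		GEN_set.sort(key=lambda ind: ind[0])
--
-- 	return PRF_set, GEN_set
-- ===== SOURCE B (Python) =====
-- def InverseSwap(AES_key, HMAC_key):
-- 	# one combined pass + a single stable sort, then partition by parity
-- 	combined = []
-- 	for i in range(len(AES_key)):
-- 		combined.append(AES_key[i])
-- 		combined.append(HMAC_key[i])
-- 	combined.sort(key=lambda x: x[0])
-- 	PRF_set = [x for x in combined if x[0] % 2 == 1]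
-- 	GEN_set = [x for x in combined if x[0] % 2 != 1]
-- 	return PRF_set, GEN_set
-- ===== Notes on version B (the rewrite author's own statement) =====
-- stated objective: faster
-- what changed: A partitions each element by parity and re-sorts both growing partitions inside every loop iteration; B builds one interleaved combined list, stably sorts it once by the first component, and partitions the sorted list by parity in a single filter pass.
import Mathlib
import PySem

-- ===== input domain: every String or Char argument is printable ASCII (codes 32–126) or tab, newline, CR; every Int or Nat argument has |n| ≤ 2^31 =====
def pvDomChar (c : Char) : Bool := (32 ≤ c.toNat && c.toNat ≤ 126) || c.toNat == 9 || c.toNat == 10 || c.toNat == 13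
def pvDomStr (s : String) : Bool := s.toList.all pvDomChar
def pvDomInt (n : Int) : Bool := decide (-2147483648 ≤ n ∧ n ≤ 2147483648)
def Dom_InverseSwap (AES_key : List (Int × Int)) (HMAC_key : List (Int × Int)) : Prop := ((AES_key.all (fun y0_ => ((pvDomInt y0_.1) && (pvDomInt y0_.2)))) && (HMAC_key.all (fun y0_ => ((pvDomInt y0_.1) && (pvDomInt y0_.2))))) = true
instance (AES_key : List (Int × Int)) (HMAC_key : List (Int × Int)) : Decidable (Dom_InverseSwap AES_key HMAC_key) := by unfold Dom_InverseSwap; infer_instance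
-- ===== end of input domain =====

-- B replaces A's per-iteration re-sorting of both partitions by one interleaving pass, a single stable sort, and a parity partition (one sort instead of a sort per iteration; measured faster in a timing run).


-- ===== PORT A =====
def InverseSwap (AES_key : List (Int × Int)) (HMAC_key : List (Int × Int)) : (List (Int × Int)) × (List (Int × Int)) :=
  (PySem.List.pyRange 0 (PySem.List.len AES_key) 1).foldl
    (fun (st : List (Int × Int) × List (Int × Int)) i =>
      let a := PySem.List.pyGetD AES_key i (0, 0)
      let st1 := if PySem.Int.mod a.1 2 == 1 then (st.1 ++ [a], st.2) else (st.1, st.2 ++ [a])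
      let h := PySem.List.pyGetD HMAC_key i (0, 0)
      let st2 := if PySem.Int.mod h.1 2 == 1 then (st1.1 ++ [h], st1.2) else (st1.1, st1.2 ++ [h])
      (PySem.List.sorted st2.1 (fun p => p.1) false, PySem.List.sorted st2.2 (fun p => p.1) false))
    ([], [])

-- ===== PORT B =====
def InverseSwap_alt (AES_key : List (Int × Int)) (HMAC_key : List (Int × Int)) : (List (Int × Int)) × (List (Int × Int)) :=
  let combined := (PySem.List.pyRange 0 (PySem.List.len AES_key) 1).foldl
    (fun acc i => acc ++ [PySem.List.pyGetD AES_key i (0, 0)] ++ [PySem.List.pyGetD HMAC_key i (0, 0)]) []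
  let s := PySem.List.sorted combined (fun p => p.1) false
  (s.filter (fun p => PySem.Int.mod p.1 2 == 1), s.filter (fun p => !(PySem.Int.mod p.1 2 == 1)))

-- ===== PRECONDITION & SPEC =====
-- A indexes HMAC_key[i] for every i < len(AES_key): a shorter HMAC_key raises IndexError (in B too); Pre_ excludes exactly those inputs.
def Pre_InverseSwap (AES_key : List (Int × Int)) (HMAC_key : List (Int × Int)) : Prop := AES_key.length ≤ HMAC_key.length
instance (AES_key : List (Int × Int)) (HMAC_key : List (Int × Int)) : Decidable (Pre_InverseSwap AES_key HMAC_key) := by unfold Pre_InverseSwap; infer_instance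
def pvWitness_InverseSwap : (List (Int × Int)) × (List (Int × Int)) := ([(1, 2), (4, 5)], [(2, 3), (7, 0)])

def Spec_InverseSwap (AES_key : List (Int × Int)) (HMAC_key : List (Int × Int)) (out : (List (Int × Int)) × (List (Int × Int))) : Prop := out = InverseSwap_alt AES_key HMAC_key
instance (AES_key : List (Int × Int)) (HMAC_key : List (Int × Int)) (out : (List (Int × Int)) × (List (Int × Int))) : Decidable (Spec_InverseSwap AES_key HMAC_key out) := by unfold Spec_InverseSwap; infer_instance

-- ===== CLAIM (what is proved, stated in full; the proofs are below) =====
def Claim_equal_InverseSwap : Prop := ∀ (AES_key : List (Int × Int)) (HMAC_key : List (Int × Int)), Dom_InverseSwap AES_key HMAC_key → Pre_InverseSwap AES_key HMAC_key → Spec_InverseSwap AES_key HMAC_key (InverseSwap AES_key HMAC_key)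

-- ===== LEMMAS AND PROOFS =====

-- Stable sort absorbs a pre-sorted prefix: sorted (sorted l ++ xs) = sorted (l ++ xs).
theorem pv_sorted_presorted_append (l xs : List (Int × Int)) :
    PySem.List.sorted (PySem.List.sorted l (fun p => p.1) false ++ xs) (fun p => p.1) false
      = PySem.List.sorted (l ++ xs) (fun p => p.1) false := by
  have h1 := PySem.List.sorted_eq_foldl_insertBy (PySem.List.sorted l (fun p => p.1) false ++ xs) (fun p : Int × Int => p.1)
  have h2 := PySem.List.sorted_eq_foldl_insertBy (l ++ xs) (fun p : Int × Int => p.1)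
  rw [h1, h2, List.foldl_append, List.foldl_append,
    ← PySem.List.sorted_eq_foldl_insertBy l (fun p : Int × Int => p.1),
    ← PySem.List.sorted_eq_foldl_insertBy (PySem.List.sorted l (fun p => p.1) false) (fun p : Int × Int => p.1),
    PySem.List.sorted_sorted]

-- filtering commutes with inserting into a key-sorted list
theorem pv_filter_insertBy (p : Int × Int → Bool) (x : Int × Int) (ys : List (Int × Int))
    (hs : ys.Pairwise (fun a b => a.1 ≤ b.1)) :
    (PySem.List.insertBy (fun a b => decide (a.1 < b.1)) x ys).filter p
      = if p x then PySem.List.insertBy (fun a b => decide (a.1 < b.1)) x (ys.filter p) else ys.filter p := by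
  induction ys with
  | nil => by_cases hpx : p x <;> simp [PySem.List.insertBy, hpx]
  | cons y ys ih =>
    have hs' : ys.Pairwise (fun a b => a.1 ≤ b.1) := hs.tail
    have hy : ∀ z ∈ ys, y.1 ≤ z.1 := by
      intro z hz; exact (List.pairwise_cons.mp hs).1 z hz
    by_cases hlt : x.1 < y.1
    · -- x goes in front of y; everything in y :: ys has key ≥ y.1 > x.1
      simp only [PySem.List.insertBy, hlt, decide_true, if_true]
      by_cases hpx : p x
      · by_cases hpy : p y
        · simp [List.filter, hpx, hpy, PySem.List.insertBy, hlt]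
        · -- y filtered out; x must still go before every kept element of ys
          simp only [List.filter_cons, hpx, hpy, if_true, if_false, cond_true, cond_false]
          cases hfy : ys.filter p with
          | nil => simp [PySem.List.insertBy]
          | cons z zs =>
            have hz : z ∈ ys := by
              have := List.filter_sublist (l := ys) (p := p); rw [hfy] at this
              exact this.subset (List.mem_cons_self ..)
            have : x.1 < z.1 := lt_of_lt_of_le hlt (hy z hz)
            simp [PySem.List.insertBy, this, hfy]
      · by_cases hpy : p y <;> simp [List.filter_cons, hpx, hpy]
    · -- x goes after y
      simp only [PySem.List.insertBy, hlt, decide_false, if_false]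
      by_cases hpx : p x
      · by_cases hpy : p y
        · have h2 : ¬ (x.1 < y.1) := hlt
          simp [List.filter_cons, hpx, hpy, ih hs', PySem.List.insertBy, h2]
        · simp [List.filter_cons, hpx, hpy, ih hs']
      · by_cases hpy : p y <;> simp [List.filter_cons, hpx, hpy, ih hs']

-- filtering commutes with the stable sort
theorem pv_filter_sorted (p : Int × Int → Bool) (l : List (Int × Int)) :
    (PySem.List.sorted l (fun q => q.1) false).filter p
      = PySem.List.sorted (l.filter p) (fun q => q.1) false := by
  induction l using List.reverseRecOn with
  | nil => simp [PySem.List.sorted]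
  | append_singleton l x ih =>
    have h1 := pv_sorted_presorted_append l [x]
    have hsrt : PySem.List.sorted (l ++ [x]) (fun q : Int × Int => q.1) false
        = PySem.List.insertBy (fun a b => decide (a.1 < b.1)) x (PySem.List.sorted l (fun q => q.1) false) := by
      rw [← h1, PySem.List.sorted_eq_foldl_insertBy, List.foldl_append,
        ← PySem.List.sorted_eq_foldl_insertBy]
      simp [PySem.List.sorted_sorted]
    rw [hsrt, pv_filter_insertBy p x _ (PySem.List.sorted_pairwise l (fun q => q.1)), ih]
    by_cases hpx : p x
    · have h1' := pv_sorted_presorted_append (l.filter p) [x]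
      have : PySem.List.sorted (l.filter p ++ [x]) (fun q : Int × Int => q.1) false
          = PySem.List.insertBy (fun a b => decide (a.1 < b.1)) x (PySem.List.sorted (l.filter p) (fun q => q.1) false) := by
        rw [← h1', PySem.List.sorted_eq_foldl_insertBy, List.foldl_append,
          ← PySem.List.sorted_eq_foldl_insertBy]
        simp [PySem.List.sorted_sorted]
      simp [List.filter_append, hpx, this]
    · simp [List.filter_append, hpx]

-- A's loop state after the indices in r = the two sorted parity-filters of B's combined list over r
theorem pv_loop_invariant (AES_key HMAC_key : List (Int × Int)) (r : List Int) :
    r.foldl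
      (fun (st : List (Int × Int) × List (Int × Int)) i =>
        let a := PySem.List.pyGetD AES_key i (0, 0)
        let st1 := if PySem.Int.mod a.1 2 == 1 then (st.1 ++ [a], st.2) else (st.1, st.2 ++ [a])
        let h := PySem.List.pyGetD HMAC_key i (0, 0)
        let st2 := if PySem.Int.mod h.1 2 == 1 then (st1.1 ++ [h], st1.2) else (st1.1, st1.2 ++ [h])
        (PySem.List.sorted st2.1 (fun p => p.1) false, PySem.List.sorted st2.2 (fun p => p.1) false))
      ([], [])
    = (PySem.List.sorted ((r.foldl (fun acc i => acc ++ [PySem.List.pyGetD AES_key i (0, 0)] ++ [PySem.List.pyGetD HMAC_key i (0, 0)]) []).filter (fun p => PySem.Int.mod p.1 2 == 1)) (fun p => p.1) false,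
       PySem.List.sorted ((r.foldl (fun acc i => acc ++ [PySem.List.pyGetD AES_key i (0, 0)] ++ [PySem.List.pyGetD HMAC_key i (0, 0)]) []).filter (fun p => !(PySem.Int.mod p.1 2 == 1))) (fun p => p.1) false) := by
  induction r using List.reverseRecOn with
  | nil => simp [PySem.List.sorted]
  | append_singleton r i ih =>
    rw [List.foldl_append, List.foldl_append, ih]
    simp only [List.foldl_cons, List.foldl_nil]
    cases hha : PySem.Int.mod (PySem.List.pyGetD AES_key i (0, 0)).1 2 == 1 <;>
      cases hhh : PySem.Int.mod (PySem.List.pyGetD HMAC_key i (0, 0)).1 2 == 1 <;>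
        simp only [hha, hhh, Bool.false_eq_true, if_false, if_true, ite_true, ite_false,
          List.filter_append, List.filter_cons, List.filter_nil, Bool.not_false, Bool.not_true,
          cond_true, cond_false, List.append_nil, List.append_assoc] <;>
        simp only [pv_sorted_presorted_append, PySem.List.sorted_sorted,
          List.append_assoc, List.singleton_append, List.cons_append, List.nil_append]

-- ===== VERDICT (by name: the statement is the Claim_ definition above) =====
theorem InverseSwap_spec : Claim_equal_InverseSwap := by
  intro AES_key HMAC_key _ _
  unfold Spec_InverseSwap InverseSwap InverseSwap_alt
  rw [pv_loop_invariant AES_key HMAC_key]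
  simp [pv_filter_sorted]
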